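-- pv_equiv track=rewrite | github.com/elizabalint/Python2023-2024 | Laborator2/Lab2_Python.py | function
-- ===== SOURCE A (Python) =====
-- def function(a,b):
--     intersectie = []
--     reuniune = []
--     diferenta_a = []
--     diferenta_b = []
--     a.sort()
--     b.sort()
--     i = 0
--     j = 0
--
--     while i < len(a) and j < len(b):
--         if a[i] == b[j]:
--             intersectie.append(a[i])
--             reuniune.append(a[i])
--             i += 1
--             j += 1
--         elif a[i] < b[j]:
--             reuniune.append(a[i])
--             diferenta_a.append(a[i])
--             i += 1
--         else:
--             reuniune.append(b[j])
--             diferenta_b.append(b[j])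
--             j += 1
--
--     while i < len(a):
--         reuniune.append(a[i])
--         diferenta_a.append(a[i])
--         i += 1
--     while j < len(b):
--         reuniune.append(b[j])
--         diferenta_b.append(b[j])
--         j += 1
--
--     return intersectie, reuniune, diferenta_a, diferenta_b
-- ===== SOURCE B (Python) =====
-- def function(a, b):
--     a.sort()
--     b.sort()
--     ca = {}
--     for x in a:
--         ca[x] = ca.get(x, 0) + 1
--     cb = {}
--     for x in b:
--         cb[x] = cb.get(x, 0) + 1
--     intersectie = []
--     reuniune = []
--     diferenta_a = []
--     diferenta_b = []
--     for v in sorted(set(ca) | set(cb)):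
--         m = ca.get(v, 0)
--         n = cb.get(v, 0)
--         intersectie += [v] * min(m, n)
--         reuniune += [v] * max(m, n)
--         diferenta_a += [v] * (m - n if m > n else 0)
--         diferenta_b += [v] * (n - m if n > m else 0)
--     return intersectie, reuniune, diferenta_a, diferenta_b
-- ===== Notes on version B (the rewrite author's own statement) =====
-- stated objective: alternative
-- what changed: Replaces the two-pointer merge over the sorted lists by per-value counting: build occurrence dicts for both lists and emit min/max/truncated-difference many copies of each value while walking the sorted set of distinct values.
import Mathlib
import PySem

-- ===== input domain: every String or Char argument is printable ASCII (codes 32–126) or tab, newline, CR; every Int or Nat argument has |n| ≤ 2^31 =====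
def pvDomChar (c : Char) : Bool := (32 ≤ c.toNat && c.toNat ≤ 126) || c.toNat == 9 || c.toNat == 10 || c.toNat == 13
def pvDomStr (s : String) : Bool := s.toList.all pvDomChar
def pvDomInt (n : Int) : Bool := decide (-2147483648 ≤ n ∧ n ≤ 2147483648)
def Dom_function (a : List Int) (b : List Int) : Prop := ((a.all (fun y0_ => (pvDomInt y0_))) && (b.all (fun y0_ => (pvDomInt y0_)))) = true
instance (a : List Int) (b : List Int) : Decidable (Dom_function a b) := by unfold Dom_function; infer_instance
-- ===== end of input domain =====

-- B replaces A's two-pointer merge by per-value counting over the sorted distinct values (alternative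
-- algorithm, same cost class). Both A and B sort the argument lists in place; the equivalence proved
-- here is about the return value (the in-place mutation is identical in both: sort a, sort b).

-- ===== PORT A =====
-- A's three while loops as the obvious structural recursion on the two sorted lists
def mergeA : List Int → List Int → List Int × List Int × List Int × List Int
  | [], ys => ([], ys, [], ys)
  | xs, [] => ([], xs, xs, [])
  | x :: xs, y :: ys =>
    if x == y then
      let r := mergeA xs ys
      (x :: r.1, x :: r.2.1, r.2.2.1, r.2.2.2)
    else if x < y then
      let r := mergeA xs (y :: ys)
      (r.1, x :: r.2.1, x :: r.2.2.1, r.2.2.2)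
    else
      let r := mergeA (x :: xs) ys
      (r.1, y :: r.2.1, r.2.2.1, y :: r.2.2.2)
termination_by xs ys => xs.length + ys.length

def function (a : List Int) (b : List Int) : List Int × List Int × List Int × List Int :=
  mergeA (PySem.List.sorted a (fun x => x)) (PySem.List.sorted b (fun x => x))

-- ===== PORT B =====
def function_alt (a : List Int) (b : List Int) : List Int × List Int × List Int × List Int :=
  let sa := PySem.List.sorted a (fun x => x)
  let sb := PySem.List.sorted b (fun x => x)
  let ca := sa.foldl (fun (d : PySem.Dict Int Int) x => d.insert x (d.getD x 0 + 1)) PySem.Dict.empty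
  let cb := sb.foldl (fun (d : PySem.Dict Int Int) x => d.insert x (d.getD x 0 + 1)) PySem.Dict.empty
  let vals := PySem.List.sorted ((PySem.Set.ofList ca.keys).union (PySem.Set.ofList cb.keys)) (fun x => x)
  vals.foldl
    (fun (acc : List Int × List Int × List Int × List Int) v =>
      let m := ca.getD v 0
      let n := cb.getD v 0
      (acc.1 ++ List.replicate (min m n).toNat v,
       acc.2.1 ++ List.replicate (max m n).toNat v,
       acc.2.2.1 ++ List.replicate (if n < m then (m - n).toNat else 0) v,
       acc.2.2.2 ++ List.replicate (if m < n then (n - m).toNat else 0) v))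
    ([], [], [], [])

-- ===== PRECONDITION & SPEC =====
def Spec_function (a : List Int) (b : List Int) (out : List Int × List Int × List Int × List Int) : Prop := out = function_alt a b
instance (a : List Int) (b : List Int) (out : List Int × List Int × List Int × List Int) : Decidable (Spec_function a b out) := by unfold Spec_function; infer_instance

-- ===== CLAIM (what is proved, stated in full; the proofs are below) =====
def Claim_equal_function : Prop := ∀ (a : List Int) (b : List Int), Dom_function a b → Spec_function a b (function a b)

-- ===== LEMMAS AND PROOFS =====

theorem mergeA_nil_left (ys : List Int) : mergeA [] ys = ([], ys, [], ys) := by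
  simp [mergeA]

theorem mergeA_cons_nil (x : Int) (xs : List Int) :
    mergeA (x :: xs) [] = ([], x :: xs, x :: xs, []) := by
  simp [mergeA]

theorem mergeA_nil_right (xs : List Int) : mergeA xs [] = ([], xs, xs, []) := by
  cases xs with
  | nil => simp [mergeA_nil_left]
  | cons x xs => simp [mergeA_cons_nil]

theorem mergeA_cons_cons (x y : Int) (xs ys : List Int) : mergeA (x :: xs) (y :: ys) =
    if x = y then
      (x :: (mergeA xs ys).1, x :: (mergeA xs ys).2.1, (mergeA xs ys).2.2.1, (mergeA xs ys).2.2.2)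
    else if x < y then
      ((mergeA xs (y :: ys)).1, x :: (mergeA xs (y :: ys)).2.1,
       x :: (mergeA xs (y :: ys)).2.2.1, (mergeA xs (y :: ys)).2.2.2)
    else
      ((mergeA (x :: xs) ys).1, y :: (mergeA (x :: xs) ys).2.1,
       (mergeA (x :: xs) ys).2.2.1, y :: (mergeA (x :: xs) ys).2.2.2) := by
  rw [mergeA]; simp

-- the 4-tuple foldl of B splits into four flatMaps
theorem fold4_eq_flatMap (f1 f2 f3 f4 : Int → List Int) :
    ∀ (vs : List Int) (a1 a2 a3 a4 : List Int),
    vs.foldl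
      (fun (acc : List Int × List Int × List Int × List Int) v =>
        (acc.1 ++ f1 v, acc.2.1 ++ f2 v, acc.2.2.1 ++ f3 v, acc.2.2.2 ++ f4 v))
      (a1, a2, a3, a4)
    = (a1 ++ vs.flatMap f1, a2 ++ vs.flatMap f2, a3 ++ vs.flatMap f3, a4 ++ vs.flatMap f4) := by
  intro vs
  induction vs with
  | nil => intro a1 a2 a3 a4; simp
  | cons v vs ih =>
      intro a1 a2 a3 a4
      simp [List.foldl_cons, ih, List.flatMap_cons, List.append_assoc]

-- A's merge consumes a common block of minimal elements exactly as B emits it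
theorem mergeA_step (v : Int) :
    ∀ (m n : Nat) (la lb : List Int), (∀ x ∈ la, v < x) → (∀ x ∈ lb, v < x) →
    mergeA (List.replicate m v ++ la) (List.replicate n v ++ lb)
      = (List.replicate (min m n) v ++ (mergeA la lb).1,
         List.replicate (max m n) v ++ (mergeA la lb).2.1,
         List.replicate (m - n) v ++ (mergeA la lb).2.2.1,
         List.replicate (n - m) v ++ (mergeA la lb).2.2.2) := by
  intro m
  induction m with
  | zero =>
      intro n
      induction n with
      | zero => intro la lb _ _; simp
      | succ n ihn =>
          intro la lb hla hlb
          cases la with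
          | nil =>
              simp [List.replicate_succ, mergeA_nil_left]
          | cons x xs =>
              have hvx : v < x := hla x (by simp)
              simp only [List.replicate_succ, List.replicate_zero, List.cons_append,
                List.nil_append, mergeA_cons_cons]
              rw [if_neg (by omega), if_neg (by omega)]
              have := ihn (x :: xs) lb hla hlb
              simp only [List.replicate_zero, List.nil_append] at this
              simp [this, List.replicate_succ]
  | succ m ihm =>
      intro n
      cases n with
      | zero =>
          intro la lb hla hlb
          cases lb with
          | nil =>
              simp [List.replicate_succ, mergeA_nil_right]
          | cons y ys =>
              have hvy : v < y := hlb y (by simp)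
              simp only [List.replicate_succ, List.replicate_zero, List.cons_append,
                List.nil_append, mergeA_cons_cons]
              rw [if_neg (by omega), if_pos hvy]
              have := ihm 0 la (y :: ys) hla hlb
              simp only [List.replicate_zero, List.nil_append] at this
              simp [this, List.replicate_succ]
      | succ n =>
          intro la lb hla hlb
          simp only [List.replicate_succ, List.cons_append, mergeA_cons_cons]
          rw [if_pos trivial]
          have := ihm n la lb hla hlb
          simp [this, Nat.succ_min_succ, Nat.succ_max_succ, List.replicate_succ]

-- a sorted list all of whose elements are ≥ v splits as (replicate (count v) v) ++ (a sorted tail > v)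
theorem sorted_decomp (v : Int) :
    ∀ (l : List Int), l.Pairwise (· ≤ ·) → (∀ x ∈ l, v ≤ x) →
    ∃ l', l = List.replicate (l.count v) v ++ l' ∧ (∀ x ∈ l', v < x) ∧ l'.Pairwise (· ≤ ·) := by
  intro l
  induction l with
  | nil => intro _ _; exact ⟨[], by simp⟩
  | cons x xs ih =>
      intro hp hge
      rcases List.pairwise_cons.mp hp with ⟨hx, hxs⟩
      by_cases hxv : x = v
      · subst hxv
        obtain ⟨l', h1, h2, h3⟩ := ih hxs (fun y hy => hx y hy)
        refine ⟨l', ?_, h2, h3⟩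
        rw [List.count_cons_self, List.replicate_succ, List.cons_append, ← h1]
      · have hvx : v < x := lt_of_le_of_ne (hge x (by simp)) (fun h => hxv h.symm)
        have hcnt : (x :: xs).count v = 0 := by
          rw [List.count_eq_zero]
          intro hmem
          rcases List.mem_cons.mp hmem with h | h
          · exact hxv h.symm
          · exact absurd (hx v h) (not_le.mpr hvx)
        refine ⟨x :: xs, by simp [hcnt], ?_, hp⟩
        intro y hy
        rcases List.mem_cons.mp hy with h | h
        · omega
        · exact lt_of_lt_of_le hvx (hx y h)

-- main induction: merge over sorted lists = per-value flatMap over the sorted distinct values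
theorem mergeA_eq_flatMap :
    ∀ (vs la lb : List Int), vs.Pairwise (· < ·) → (∀ x, x ∈ vs ↔ x ∈ la ∨ x ∈ lb) →
    la.Pairwise (· ≤ ·) → lb.Pairwise (· ≤ ·) →
    mergeA la lb
      = (vs.flatMap (fun v => List.replicate (min (la.count v) (lb.count v)) v),
         vs.flatMap (fun v => List.replicate (max (la.count v) (lb.count v)) v),
         vs.flatMap (fun v => List.replicate (la.count v - lb.count v) v),
         vs.flatMap (fun v => List.replicate (lb.count v - la.count v) v)) := by
  intro vs
  induction vs with
  | nil =>
      intro la lb _ hmem _ _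
      have hla : la = [] := by
        cases la with
        | nil => rfl
        | cons x xs => exact absurd ((hmem x).mpr (Or.inl (by simp))) (by simp)
      have hlb : lb = [] := by
        cases lb with
        | nil => rfl
        | cons y ys => exact absurd ((hmem y).mpr (Or.inr (by simp))) (by simp)
      subst hla; subst hlb; simp [mergeA_nil_left]
  | cons v vs ih =>
      intro la lb hp hmem hla hlb
      rcases List.pairwise_cons.mp hp with ⟨hvlt, hvs⟩
      have hge : ∀ x, x ∈ la ∨ x ∈ lb → v ≤ x := by
        intro x hx
        have hxm : x ∈ v :: vs := (hmem x).mpr hx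
        rcases List.mem_cons.mp hxm with h | h
        · omega
        · exact le_of_lt (hvlt x h)
      obtain ⟨la', ha1, ha2, ha3⟩ := sorted_decomp v la hla (fun x hx => hge x (Or.inl hx))
      obtain ⟨lb', hb1, hb2, hb3⟩ := sorted_decomp v lb hlb (fun x hx => hge x (Or.inr hx))
      have hca : ∀ u, u ≠ v → la.count u = la'.count u := by
        intro u hu
        have hvu : (v == u) = false := by simpa [beq_eq_false_iff_ne] using Ne.symm hu
        rw [ha1, List.count_append, List.count_replicate, hvu]
        simp
      have hcb : ∀ u, u ≠ v → lb.count u = lb'.count u := by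
        intro u hu
        have hvu : (v == u) = false := by simpa [beq_eq_false_iff_ne] using Ne.symm hu
        rw [hb1, List.count_append, List.count_replicate, hvu]
        simp
      have hmem' : ∀ x, x ∈ vs ↔ x ∈ la' ∨ x ∈ lb' := by
        intro x
        constructor
        · intro hx
          have hxv : v < x := hvlt x hx
          rcases (hmem x).mp (List.mem_cons_of_mem v hx) with h | h
          · left
            rw [ha1] at h
            rcases List.mem_append.mp h with h | h
            · exact absurd (List.eq_of_mem_replicate h) (by omega)
            · exact h
          · right
            rw [hb1] at h
            rcases List.mem_append.mp h with h | h
            · exact absurd (List.eq_of_mem_replicate h) (by omega)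
            · exact h
        · intro hx
          have hxm : x ∈ la ∨ x ∈ lb := by
            rcases hx with h | h
            · exact Or.inl (by rw [ha1]; exact List.mem_append_right _ h)
            · exact Or.inr (by rw [hb1]; exact List.mem_append_right _ h)
          rcases List.mem_cons.mp ((hmem x).mpr hxm) with h | h
          · exfalso
            rcases hx with hmm | hmm
            · exact absurd (ha2 x hmm) (by omega)
            · exact absurd (hb2 x hmm) (by omega)
          · exact h
      have hrec := ih la' lb' hvs hmem' ha3 hb3
      have hstep := mergeA_step v (la.count v) (lb.count v) la' lb' ha2 hb2
      have hcva : la.count v = (List.replicate (la.count v) v ++ la').count v := by rw [← ha1]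
      have hcvb : lb.count v = (List.replicate (lb.count v) v ++ lb').count v := by rw [← hb1]
      rw [ha1, hb1, hstep, hrec]
      simp only [List.flatMap_cons, ← hcva, ← hcvb]
      refine Prod.ext ?_ (Prod.ext ?_ (Prod.ext ?_ ?_)) <;>
      · simp only []
        rw [← ha1, ← hb1]
        congr 1
        rw [List.flatMap, List.flatMap]
        congr 1
        apply List.map_congr_left
        intro u hu
        have huv : u ≠ v := by have := hvlt u hu; omega
        rw [hca u huv, hcb u huv]

theorem mem_sorted_iff (l : List Int) (u : Int) :
    u ∈ PySem.List.sorted l (fun x => x) ↔ u ∈ l :=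
  (PySem.List.sorted_perm l (fun x => x) false).mem_iff

theorem sorted_pairwise_le (l : List Int) :
    (PySem.List.sorted l (fun x => x)).Pairwise (· ≤ ·) :=
  PySem.List.sorted_pairwise l (fun x => x)

-- sorting a duplicate-free list gives a strictly increasing list
theorem vals_pairwise_lt (s : List Int) (hnd : s.Nodup) :
    (PySem.List.sorted s (fun x => x)).Pairwise (· < ·) := by
  have hle : (PySem.List.sorted s (fun x => x)).Pairwise (· ≤ ·) :=
    PySem.List.sorted_pairwise s (fun x => x)
  have hnd' : (PySem.List.sorted s (fun x => x)).Nodup :=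
    (PySem.List.sorted_perm s (fun x => x) false).nodup_iff.mpr hnd
  exact (hle.and hnd').imp (fun hab => lt_of_le_of_ne hab.1 hab.2)

-- Set.ofList is idempotent (keys of a counter are already duplicate-free)
theorem ofList_idem (xs : List Int) :
    PySem.Set.ofList (PySem.Set.ofList xs) = PySem.Set.ofList xs :=
  PySem.Set.ofList_eq_self_of_nodup _ (PySem.Set.nodup_ofList xs)

theorem function_eq_alt (a b : List Int) : function a b = function_alt a b := by
  unfold function function_alt
  simp only [PySem.Dict.foldl_insert_getD_add_one_eq_counter, PySem.Dict.keys_counter,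
    ofList_idem]
  rw [fold4_eq_flatMap]
  have hnd : ((PySem.Set.ofList (PySem.List.sorted a (fun x => x))).union
      (PySem.Set.ofList (PySem.List.sorted b (fun x => x)))).Nodup :=
    PySem.Set.nodup_union _ _ (PySem.Set.nodup_ofList _)
  have hmem : ∀ x, x ∈ PySem.List.sorted ((PySem.Set.ofList (PySem.List.sorted a (fun x => x))).union
      (PySem.Set.ofList (PySem.List.sorted b (fun x => x)))) (fun x => x) ↔
      x ∈ PySem.List.sorted a (fun x => x) ∨ x ∈ PySem.List.sorted b (fun x => x) := by
    intro x
    rw [mem_sorted_iff, PySem.Set.mem_union, PySem.Set.mem_ofList, PySem.Set.mem_ofList]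
  rw [mergeA_eq_flatMap _ _ _ (vals_pairwise_lt _ hnd) hmem
    (sorted_pairwise_le a) (sorted_pairwise_le b)]
  simp only [List.nil_append]
  refine Prod.ext ?_ (Prod.ext ?_ (Prod.ext ?_ ?_)) <;>
  · simp only []
    rw [List.flatMap, List.flatMap]
    congr 1
    apply List.map_congr_left
    intro u _
    rw [PySem.Dict.getD_counter, PySem.Dict.getD_counter]
    congr 1
    first
    | (split_ifs <;> omega)
    | omega

-- ===== VERDICT (by name: the statement is the Claim_ definition above) =====
theorem function_spec : Claim_equal_function := by
  intro a b _
  unfold Spec_function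
  exact function_eq_alt a b
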